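-- pv_equiv track=rewrite | github.com/synara-system/pars | core/scanners/xss.py | _select_core_payloads
-- ===== SOURCE A (Python) =====
-- from typing import Callable, List, Dict, Any, Optional, Set
--
-- def _select_core_payloads(payloads: List[str], limit: int) -> List[str]:
--     # Payloadları önceliklendir
--     high_impact = []
--     rest = []
--     for p in payloads:
--         lower = p.lower()
--         if any(k in lower for k in ["<script", "onerror", "onload", "<svg", "img src"]):
--             high_impact.append(p)
--         else:
--             rest.append(p)
--     ordered = high_impact + rest
--     return ordered[:limit]
-- ===== SOURCE B (Python) =====
-- def _select_core_payloads(payloads, limit):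
--     def _prio(p):
--         lower = p.lower()
--         return 0 if any(k in lower for k in ["<script", "onerror", "onload", "<svg", "img src"]) else 1
--     return sorted(payloads, key=_prio)[:limit]
-- ===== Notes on version B (the rewrite author's own statement) =====
-- stated objective: simpler
-- what changed: Replaces the explicit two-bucket partition-and-concatenate loop with a single stable sort by a 0/1 priority key followed by the same slice.
import Mathlib
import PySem

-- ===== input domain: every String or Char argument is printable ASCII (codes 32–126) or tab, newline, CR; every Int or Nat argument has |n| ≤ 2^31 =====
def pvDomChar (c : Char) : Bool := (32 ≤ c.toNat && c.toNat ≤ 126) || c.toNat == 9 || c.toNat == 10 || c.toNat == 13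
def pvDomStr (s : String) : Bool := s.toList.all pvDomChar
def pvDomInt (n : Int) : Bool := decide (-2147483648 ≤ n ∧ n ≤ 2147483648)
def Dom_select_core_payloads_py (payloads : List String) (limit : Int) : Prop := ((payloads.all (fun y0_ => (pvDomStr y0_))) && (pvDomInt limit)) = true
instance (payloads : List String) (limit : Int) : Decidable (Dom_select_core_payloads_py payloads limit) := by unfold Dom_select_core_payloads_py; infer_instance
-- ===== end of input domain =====

-- B replaces A's two-bucket partition-and-concatenate loop by one stable sort on a 0/1 priority key, then the same slice (simpler, not faster).


-- the shared keyword list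
def pvKeywords : List String := ["<script", "onerror", "onload", "<svg", "img src"]

-- ===== PORT A =====
-- literal port: partition into high_impact / rest with two append-accumulators, concatenate, slice [:limit]
def select_core_payloads_py (payloads : List String) (limit : Int) : List String :=
  let st := payloads.foldl (fun (acc : List String × List String) p =>
    let lower := PySem.Str.lower p
    if pvKeywords.any (fun k => PySem.Str.isIn k lower) then (acc.1 ++ [p], acc.2)
    else (acc.1, acc.2 ++ [p])) ([], [])
  PySem.List.slice (st.1 ++ st.2) none (some limit)

-- ===== PORT B =====
-- priority key: 0 for high-impact payloads, 1 otherwise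
def pvPrio (p : String) : Int :=
  let lower := PySem.Str.lower p
  if pvKeywords.any (fun k => PySem.Str.isIn k lower) then 0 else 1

-- port of B: stable sort by the key, then the same slice [:limit]
def select_core_payloads_py_alt (payloads : List String) (limit : Int) : List String :=
  PySem.List.slice (PySem.List.sorted payloads pvPrio) none (some limit)

-- ===== PRECONDITION & SPEC =====
def Spec_select_core_payloads_py (payloads : List String) (limit : Int) (out : List String) : Prop := out = select_core_payloads_py_alt payloads limit
instance (payloads : List String) (limit : Int) (out : List String) : Decidable (Spec_select_core_payloads_py payloads limit out) := by unfold Spec_select_core_payloads_py; infer_instance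

-- ===== CLAIM (what is proved, stated in full; the proofs are below) =====
def Claim_equal_select_core_payloads_py : Prop := ∀ (payloads : List String) (limit : Int), Dom_select_core_payloads_py payloads limit → Spec_select_core_payloads_py payloads limit (select_core_payloads_py payloads limit)

-- ===== LEMMAS AND PROOFS =====

-- stable insertion of a key-0 element into (all-0 ++ all-1) lands exactly between the blocks
lemma insertBy_mid (x : String) (A B : List String)
    (hA : ∀ y ∈ A, pvPrio y = 0) (hB : ∀ y ∈ B, pvPrio y = 1) (hx : pvPrio x = 0) :
    PySem.List.insertBy (fun a b => decide (pvPrio a < pvPrio b)) x (A ++ B) = A ++ x :: B := by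
  induction A with
  | nil =>
    cases B with
    | nil => simp [PySem.List.insertBy]
    | cons y ys => simp [PySem.List.insertBy, hx, hB y (by simp)]
  | cons a as ih =>
    have ha : pvPrio a = 0 := hA a (by simp)
    simp only [List.cons_append, PySem.List.insertBy, hx, ha]
    simp only [show decide ((0:Int) < 0) = false by decide, Bool.false_eq_true, if_false]
    rw [ih (fun y hy => hA y (by simp [hy]))]

-- loop invariant: insertion-sorting xs onto h ++ r equals A's two-bucket partition fold
lemma fold_inv (xs : List String) : ∀ (h r : List String),
    (∀ y ∈ h, pvPrio y = 0) → (∀ y ∈ r, pvPrio y = 1) →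
    xs.foldl (fun acc x => PySem.List.insertBy (fun a b => decide (pvPrio a < pvPrio b)) x acc) (h ++ r)
      = (xs.foldl (fun (acc : List String × List String) p =>
          let lower := PySem.Str.lower p
          if pvKeywords.any (fun k => PySem.Str.isIn k lower) then (acc.1 ++ [p], acc.2)
          else (acc.1, acc.2 ++ [p])) (h, r)).1
        ++ (xs.foldl (fun (acc : List String × List String) p =>
          let lower := PySem.Str.lower p
          if pvKeywords.any (fun k => PySem.Str.isIn k lower) then (acc.1 ++ [p], acc.2)
          else (acc.1, acc.2 ++ [p])) (h, r)).2 := by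
  induction xs with
  | nil => intro h r _ _; rfl
  | cons x xs ih =>
    intro h r hh hr
    by_cases hc : pvKeywords.any (fun k => PySem.Str.isIn k (PySem.Str.lower x)) = true
    · have hx : pvPrio x = 0 := by simp only [pvPrio]; rw [if_pos hc]
      simp only [List.foldl_cons, hc, if_true]
      rw [insertBy_mid x h r hh hr hx,
        show h ++ x :: r = (h ++ [x]) ++ r by simp]
      exact ih (h ++ [x]) r
        (fun y hy => by rcases List.mem_append.1 hy with h1 | h1
                        · exact hh y h1
                        · simp at h1; simpa [h1] using hx) hr
    · have hx : pvPrio x = 1 := by simp only [pvPrio]; rw [if_neg hc]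
      have hnone : ∀ y ∈ h ++ r, (decide (pvPrio x < pvPrio y)) = false := by
        intro y hy
        rcases List.mem_append.1 hy with h1 | h1
        · simp [hx, hh y h1]
        · simp [hx, hr y h1]
      simp only [List.foldl_cons, hc, Bool.false_eq_true, if_false]
      rw [PySem.List.insertBy_of_forall_not_before _ _ _ hnone,
        show (h ++ r) ++ [x] = h ++ (r ++ [x]) by simp]
      exact ih h (r ++ [x])
        hh (fun y hy => by rcases List.mem_append.1 hy with h1 | h1
                           · exact hr y h1
                           · simp at h1; simpa [h1] using hx)

-- ===== VERDICT (by name: the statement is the Claim_ definition above) =====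
theorem select_core_payloads_py_spec : Claim_equal_select_core_payloads_py := by
  intro payloads limit _
  unfold Spec_select_core_payloads_py select_core_payloads_py select_core_payloads_py_alt
  rw [PySem.List.sorted_eq_foldl_insertBy]
  have := fold_inv payloads [] [] (by simp) (by simp)
  simp only [List.nil_append] at this
  rw [this]
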